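-- pv_equiv track=rewrite | github.com/HectUch/python-timeseries_MSA | msaAuxFunctions.py | findLongest
-- ===== SOURCE A (Python) =====
-- def findLongest(string_without_gaps):
--
--     begin = 0
--     end = 0
--
--     beginMax = 0
--     endMax = 0
--     for i in range(1,len(string_without_gaps)):
--        if string_without_gaps[i] == '-' and  string_without_gaps[i-1] != '-':
--            end = i -1
--            if (end - begin) > (endMax - beginMax):
--                endMax = end
--                beginMax = begin
--        if string_without_gaps[i] != '-' and  string_without_gaps[i-1] == '-':
--            begin = i
--
--
--     return [beginMax,endMax]
-- ===== SOURCE B (Python) =====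
-- # B: run-skipping scanner — finds each maximal non-gap run at once and keeps the best
-- # run that is followed by a gap, instead of A's per-index transition automaton.
-- def findLongest(string_without_gaps):
--     s = string_without_gaps
--     n = len(s)
--     beginMax = 0
--     endMax = 0
--     i = 0
--     while i < n:
--         if s[i] == '-':
--             i += 1
--             continue
--         run = 1
--         while i + run < n and s[i + run] != '-':
--             run += 1
--         if i + run < n and run - 1 > endMax - beginMax:
--             beginMax = i
--             endMax = i + run - 1
--         i += run
--     return [beginMax, endMax]
-- ===== Notes on version B (the rewrite author's own statement) =====
-- stated objective: alternative
-- what changed: A is a per-index transition automaton over range(1,len(s)) comparing s[i] with s[i-1]; B instead scans by whole runs: it skips gap characters, measures each maximal non-gap run with an inner loop, updates the best run only when it is followed by a gap, and jumps past the run.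
import Mathlib
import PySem

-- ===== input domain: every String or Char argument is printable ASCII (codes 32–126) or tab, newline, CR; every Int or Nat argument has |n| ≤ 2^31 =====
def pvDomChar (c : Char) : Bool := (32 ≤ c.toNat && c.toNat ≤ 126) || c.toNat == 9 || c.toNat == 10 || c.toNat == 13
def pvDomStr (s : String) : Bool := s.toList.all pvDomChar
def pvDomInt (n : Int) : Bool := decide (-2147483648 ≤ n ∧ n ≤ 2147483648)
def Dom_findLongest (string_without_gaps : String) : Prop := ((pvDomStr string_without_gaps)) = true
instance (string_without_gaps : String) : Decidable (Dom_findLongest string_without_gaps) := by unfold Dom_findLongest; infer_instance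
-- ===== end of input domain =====

-- B replaces A's per-index transition automaton by a run-skipping scan (objective: alternative, same O(n) cost).

-- ===== PORT A =====
def findLongest (string_without_gaps : String) : List Int :=
  let st := (PySem.List.pyRange 1 (PySem.Str.len string_without_gaps) 1).foldl
    (fun (st : Int × Int × Int × Int) i =>
      let b := st.1; let e := st.2.1; let bM := st.2.2.1; let eM := st.2.2.2
      let s1 : Int × Int × Int :=
        if PySem.Str.pyGet? string_without_gaps i = some '-' ∧
           PySem.Str.pyGet? string_without_gaps (i - 1) ≠ some '-' then
          if (i - 1) - b > eM - bM then (i - 1, b, i - 1) else (i - 1, bM, eM)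
        else (e, bM, eM)
      let b' : Int :=
        if PySem.Str.pyGet? string_without_gaps i ≠ some '-' ∧
           PySem.Str.pyGet? string_without_gaps (i - 1) = some '-' then i else b
      (b', s1.1, s1.2.1, s1.2.2)) (0, 0, 0, 0)
  [st.2.2.1, st.2.2.2]

-- ===== PORT B =====
-- inner while: length of the leading non-gap run
def runLenB : List Char → Nat
  | [] => 0
  | c :: cs => if c = '-' then 0 else runLenB cs + 1

-- outer while: skip a gap char, or measure a whole run, update the best, jump past it
def goB : List Char → Int → Int × Int → Int × Int
  | [], _, best => best
  | c :: cs, i, best =>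
    if c = '-' then goB cs (i + 1) best
    else
      let run := runLenB (c :: cs)
      let best' := if run < (c :: cs).length ∧ (run : Int) - 1 > best.2 - best.1 then
          (i, i + (run : Int) - 1) else best
      goB ((c :: cs).drop run) (i + (run : Int)) best'
termination_by cs => cs.length
decreasing_by
  · simp
  · have : c = '-' → False := by assumption
    simp only [runLenB, if_neg ‹¬ c = '-'›, List.drop_succ_cons]
    have h1 : (cs.drop (runLenB cs)).length ≤ cs.length := by simp
    have h2 : (c :: cs).length = cs.length + 1 := by simp
    omega

def findLongest_alt (string_without_gaps : String) : List Int :=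
  let best := goB string_without_gaps.toList 0 (0, 0)
  [best.1, best.2]

-- ===== PRECONDITION & SPEC =====
def Spec_findLongest (string_without_gaps : String) (out : List Int) : Prop := out = findLongest_alt string_without_gaps
instance (string_without_gaps : String) (out : List Int) : Decidable (Spec_findLongest string_without_gaps out) := by unfold Spec_findLongest; infer_instance

-- ===== CLAIM (what is proved, stated in full; the proofs are below) =====
def Claim_equal_findLongest : Prop := ∀ (string_without_gaps : String), Dom_findLongest string_without_gaps → Spec_findLongest string_without_gaps (findLongest string_without_gaps)

-- ===== LEMMAS AND PROOFS =====

-- A's loop body on explicit characters (prev = s[i-1], cur = s[i])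
def stepC (st : Int × Int × Int × Int) (prev cur : Char) (i : Int) : Int × Int × Int × Int :=
  let b := st.1; let e := st.2.1; let bM := st.2.2.1; let eM := st.2.2.2
  let s1 : Int × Int × Int :=
    if cur = '-' ∧ prev ≠ '-' then
      if (i - 1) - b > eM - bM then (i - 1, b, i - 1) else (i - 1, bM, eM)
    else (e, bM, eM)
  let b' : Int := if cur ≠ '-' ∧ prev = '-' then i else b
  (b', s1.1, s1.2.1, s1.2.2)

-- A's loop as a structural scan carrying the previous character
def scanC : Char → List Char → Int → Int × Int × Int × Int → Int × Int × Int × Int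
  | _, [], _, st => st
  | p, c :: cs, i, st => scanC c cs (i + 1) (stepC st p c i)

-- A's whole loop, phrased over the character list
def scanTopC : List Char → Int × Int × Int × Int
  | [] => (0, 0, 0, 0)
  | c :: cs => scanC c cs 1 (0, 0, 0, 0)

-- A's index-driven foldl, over the character list
def AfoldL (l : List Char) : Int × Int × Int × Int :=
  (PySem.List.pyRange 1 (l.length : Int) 1).foldl
    (fun (st : Int × Int × Int × Int) i =>
      let b := st.1; let e := st.2.1; let bM := st.2.2.1; let eM := st.2.2.2
      let s1 : Int × Int × Int :=
        if PySem.List.pyGet? l i = some '-' ∧ PySem.List.pyGet? l (i - 1) ≠ some '-' then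
          if (i - 1) - b > eM - bM then (i - 1, b, i - 1) else (i - 1, bM, eM)
        else (e, bM, eM)
      let b' : Int :=
        if PySem.List.pyGet? l i ≠ some '-' ∧ PySem.List.pyGet? l (i - 1) = some '-' then i else b
      (b', s1.1, s1.2.1, s1.2.2)) (0, 0, 0, 0)

theorem port_eq_AfoldL (s : String) :
    findLongest s = [(AfoldL s.toList).2.2.1, (AfoldL s.toList).2.2.2] := by
  simp [findLongest, AfoldL]
  exact ⟨rfl, rfl⟩

theorem scanC_append (cs : List Char) : ∀ (p c : Char) (i : Int) (st : Int × Int × Int × Int),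
    scanC p (cs ++ [c]) i st
      = stepC (scanC p cs i st) ((p :: cs).getLast (by simp)) c (i + cs.length) := by
  induction cs with
  | nil => intro p c i st; simp [scanC]
  | cons d cs' ih =>
      intro p c i st
      have h1 : (p :: d :: cs').getLast (by simp) = (d :: cs').getLast (by simp) :=
        List.getLast_cons (by simp)
      simp only [List.cons_append, scanC, ih, h1, List.length_cons]
      congr 1
      push_cast
      ring

theorem pyGet?_append_lt (l : List Char) (c : Char) (j : Int) (h0 : 0 ≤ j)
    (h1 : j < (l.length : Int)) :
    PySem.List.pyGet? (l ++ [c]) j = PySem.List.pyGet? l j := by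
  rw [PySem.List.pyGet?_of_nonneg _ h0, PySem.List.pyGet?_of_nonneg _ h0,
    List.getElem?_append_left (by omega)]

theorem pyGet?_append_last (l : List Char) (c : Char) (hl : l ≠ []) :
    PySem.List.pyGet? (l ++ [c]) ((l.length : Int) - 1) = some (l.getLast hl) := by
  have h1 : 0 < l.length := List.length_pos_of_ne_nil hl
  have hc : ((l.length : Int) - 1) = ((l.length - 1 : Nat) : Int) := by omega
  rw [hc, PySem.List.pyGet?_natCast, List.getElem?_append_left (by omega),
    List.getElem?_eq_getElem (by omega)]
  simp [List.getLast_eq_getElem]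

theorem AfoldL_append (l : List Char) (c : Char) (hl : l ≠ []) :
    AfoldL (l ++ [c]) = stepC (AfoldL l) (l.getLast hl) c (l.length : Int) := by
  have h1 : 0 < l.length := List.length_pos_of_ne_nil hl
  have hlen1 : (1 : Int) ≤ (l.length : Int) := by omega
  have hcast : (((l ++ [c]).length : Nat) : Int) = (l.length : Int) + 1 := by simp
  unfold AfoldL
  rw [hcast, PySem.List.pyRange_one_succ_right hlen1, List.foldl_append]
  simp only [List.foldl_cons, List.foldl_nil]
  rw [PySem.List.foldl_congr_mem _ _
    (fun (st : Int × Int × Int × Int) i =>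
      let b := st.1; let e := st.2.1; let bM := st.2.2.1; let eM := st.2.2.2
      let s1 : Int × Int × Int :=
        if PySem.List.pyGet? l i = some '-' ∧ PySem.List.pyGet? l (i - 1) ≠ some '-' then
          if (i - 1) - b > eM - bM then (i - 1, b, i - 1) else (i - 1, bM, eM)
        else (e, bM, eM)
      let b' : Int :=
        if PySem.List.pyGet? l i ≠ some '-' ∧ PySem.List.pyGet? l (i - 1) = some '-' then i else b
      (b', s1.1, s1.2.1, s1.2.2)) _
    (by
      intro acc x hx
      rw [PySem.List.mem_pyRange_one] at hx
      rw [pyGet?_append_lt l c x (by omega) (by omega),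
        pyGet?_append_lt l c (x - 1) (by omega) (by omega)])]
  rw [show PySem.List.pyGet? (l ++ [c]) ((l.length : Int)) = some c from by
      simpa using PySem.List.pyGet?_append_length l [] c,
    pyGet?_append_last l c hl]
  simp [stepC]

theorem AfoldL_eq_scanTopC (l : List Char) : AfoldL l = scanTopC l := by
  induction l using List.reverseRecOn with
  | nil => simp [AfoldL, scanTopC, PySem.List.pyRange]
  | append_singleton l c ih =>
      cases l with
      | nil => simp [AfoldL, scanTopC, scanC, PySem.List.pyRange]
      | cons d l' =>
        have h2 : scanTopC (d :: (l' ++ [c])) = scanC d (l' ++ [c]) 1 (0, 0, 0, 0) := rfl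
        have h3 : scanTopC (d :: l') = scanC d l' 1 (0, 0, 0, 0) := rfl
        rw [AfoldL_append (d :: l') c (by simp), ih,
          show (d :: l') ++ [c] = d :: (l' ++ [c]) from rfl, h2, h3, scanC_append]
        congr 1
        simp
        omega

theorem goB_gap (cs : List Char) (i : Int) (best : Int × Int) :
    goB ('-' :: cs) i best = goB cs (i + 1) best := by
  rw [goB]
  simp

theorem goB_cons_nongap (c : Char) (cs : List Char) (i : Int) (best : Int × Int)
    (hc : c ≠ '-') :
    goB (c :: cs) i best
      = goB (cs.drop (runLenB cs)) (i + (runLenB cs : Int) + 1)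
          (if runLenB cs < cs.length ∧ ((runLenB cs : Int)) > best.2 - best.1
           then (i, i + (runLenB cs : Int)) else best) := by
  have h1 : ((runLenB cs + 1 : Nat) : Int) - 1 = (runLenB cs : Int) := by push_cast; ring
  have h2 : i + ((runLenB cs + 1 : Nat) : Int) = i + (runLenB cs : Int) + 1 := by push_cast; ring
  have h3 : (runLenB cs + 1 < cs.length + 1) = (runLenB cs < cs.length) := by simp
  have h4 : i + (runLenB cs : Int) + 1 - 1 = i + (runLenB cs : Int) := by ring
  rw [goB]
  simp only [if_neg hc, runLenB, List.drop_succ_cons, List.length_cons, h1, h2, h3, h4]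

theorem stepC_gapgap (b e bM eM i : Int) : stepC (b, e, bM, eM) '-' '-' i = (b, e, bM, eM) := by
  simp [stepC]

theorem stepC_gap_nongap (b e bM eM : Int) (c : Char) (hc : c ≠ '-') (i : Int) :
    stepC (b, e, bM, eM) '-' c i = (i, e, bM, eM) := by
  simp [stepC, hc]

theorem stepC_nongap_nongap (b e bM eM : Int) (p c : Char) (hp : p ≠ '-') (hc : c ≠ '-')
    (i : Int) : stepC (b, e, bM, eM) p c i = (b, e, bM, eM) := by
  simp [stepC, hp, hc]

theorem stepC_nongap_gap (b e bM eM : Int) (p : Char) (hp : p ≠ '-') (i : Int) :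
    stepC (b, e, bM, eM) p '-' i
      = if (i - 1) - b > eM - bM then (b, i - 1, b, i - 1) else (b, i - 1, bM, eM) := by
  simp [stepC, hp]
  split <;> rfl

theorem GR : ∀ (n : Nat) (cs : List Char), cs.length ≤ n →
    (∀ (i b e bM eM : Int),
        ((scanC '-' cs i (b, e, bM, eM)).2.2.1, (scanC '-' cs i (b, e, bM, eM)).2.2.2)
          = goB cs i (bM, eM))
  ∧ (∀ (p : Char), p ≠ '-' → ∀ (i b e bM eM : Int),
        ((scanC p cs i (b, e, bM, eM)).2.2.1, (scanC p cs i (b, e, bM, eM)).2.2.2)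
          = goB (cs.drop (runLenB cs)) (i + (runLenB cs : Int))
              (if runLenB cs < cs.length ∧ (i + (runLenB cs : Int) - 1) - b > eM - bM
               then (b, i + (runLenB cs : Int) - 1) else (bM, eM))) := by
  intro n
  induction n with
  | zero =>
      intro cs hcs
      have : cs = [] := List.eq_nil_of_length_eq_zero (by omega)
      subst this
      constructor
      · intro i b e bM eM; simp [scanC, goB]
      · intro p hp i b e bM eM; simp [scanC, goB, runLenB]
  | succ m ih =>
      intro cs hcs
      cases cs with
      | nil =>
          constructor
          · intro i b e bM eM; simp [scanC, goB]
          · intro p hp i b e bM eM; simp [scanC, goB, runLenB]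
      | cons c cs' =>
          have hlen : cs'.length ≤ m := by simp at hcs; omega
          constructor
          · intro i b e bM eM
            by_cases hc : c = '-'
            · subst hc
              simp only [scanC, stepC_gapgap]
              rw [goB_gap]
              exact (ih cs' hlen).1 (i + 1) b e bM eM
            · simp only [scanC, stepC_gap_nongap b e bM eM c hc]
              rw [(ih cs' hlen).2 c hc (i + 1) i e bM eM,
                goB_cons_nongap c cs' i (bM, eM) hc]
              ring_nf
          · intro p hp i b e bM eM
            by_cases hc : c = '-'
            · subst hc
              have hrl : runLenB ('-' :: cs') = 0 := by simp [runLenB]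
              simp only [scanC, stepC_nongap_gap b e bM eM p hp, hrl, Nat.cast_zero,
                List.drop_zero, List.length_cons, add_zero]
              rw [goB_gap]
              simp only [Nat.zero_lt_succ, true_and]
              split_ifs with hcond
              · exact (ih cs' hlen).1 (i + 1) b (i - 1) b (i - 1)
              · exact (ih cs' hlen).1 (i + 1) b (i - 1) bM eM
            · have hrl : runLenB (c :: cs') = runLenB cs' + 1 := by simp [runLenB, hc]
              simp only [scanC, stepC_nongap_nongap b e bM eM p c hp hc]
              rw [(ih cs' hlen).2 c hc (i + 1) b e bM eM]
              simp only [hrl, List.drop_succ_cons, List.length_cons,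
                Nat.add_lt_add_iff_right]
              push_cast
              ring_nf

theorem findLongest_spec : Claim_equal_findLongest := by
  intro s hdom
  unfold Spec_findLongest findLongest_alt
  rw [port_eq_AfoldL, AfoldL_eq_scanTopC]
  cases hl : s.toList with
  | nil => simp [scanTopC, goB]
  | cons c cs =>
      have h2 : scanTopC (c :: cs) = scanC c cs 1 (0, 0, 0, 0) := rfl
      rw [h2]
      by_cases hc : c = '-'
      · subst hc
        have hG := (GR cs.length cs le_rfl).1 1 0 0 0 0
        rw [goB_gap cs 0 (0, 0)]
        rw [show (0 : Int) + 1 = 1 from by ring]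
        exact congrArg (fun p : Int × Int => [p.1, p.2]) hG
      · have hR := (GR cs.length cs le_rfl).2 c hc 1 0 0 0 0
        rw [goB_cons_nongap c cs 0 (0, 0) hc]
        rw [show (0 : Int) + (runLenB cs : Int) + 1 = 1 + (runLenB cs : Int) from by ring,
          show (0 : Int) + (runLenB cs : Int) = 1 + (runLenB cs : Int) - 1 from by ring]
        have hcond : (runLenB cs < cs.length ∧ ((runLenB cs : Int)) > ((0, 0) : Int × Int).2 - ((0, 0) : Int × Int).1)
            ↔ (runLenB cs < cs.length ∧ 1 + (runLenB cs : Int) - 1 - 0 > 0 - 0) := by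
          constructor <;> (intro h; exact ⟨h.1, by omega⟩)
        simp only [hcond]
        exact congrArg (fun p : Int × Int => [p.1, p.2]) hR
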